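-- pv_equiv track=rewrite | github.com/samuelsmal/drosophVAE | som_vae/helpers/video.py | group_by_cluster
-- ===== SOURCE A (Python) =====
-- from itertools import groupby
--
-- def group_by_cluster(data):
--     """Returns the lengths of sequences.
--     Example: AABAAAA -> [[0, 1], [2], [3, 4, 5], [6, 7]]
--
--     """
--     sequences = []
--     cur_embedding_idx = 0
--     cur_seq = [0]
--     for i in range(len(data))[1:]:
--         if data[i] == data[cur_embedding_idx]:
--             cur_seq += [i]
--         else:
--             sequences += [(data[cur_embedding_idx], cur_seq)]
--             cur_embedding_idx = i
--             cur_seq = [i]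
--
--     sequences += [(data[cur_embedding_idx], cur_seq)]
--
--     return {embedding_id: [el[1] for el in emb_frames] for embedding_id, emb_frames in groupby(sorted(sequences, key=lambda x: x[0]), key=lambda x: x[0])}
-- ===== SOURCE B (Python) =====
-- def group_by_cluster(data):
--     """Returns the lengths of sequences.
--     Example: AABAAAA -> [[0, 1], [2], [3, 4, 5], [6, 7]]
--
--     """
--     runs = {}
--     cur_val = data[0]
--     cur_run = [0]
--     for i in range(1, len(data)):
--         if data[i] == cur_val:
--             cur_run.append(i)
--         else:
--             runs.setdefault(cur_val, []).append(cur_run)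
--             cur_val = data[i]
--             cur_run = [i]
--     runs.setdefault(cur_val, []).append(cur_run)
--     return {k: runs[k] for k in sorted(runs)}
-- ===== Notes on version B (the rewrite author's own statement) =====
-- stated objective: simpler
-- what changed: B accumulates finished runs directly into a dict keyed by cluster id during the single scan and returns it with sorted keys, removing A's intermediate flat tuple list and its whole sort-all-runs + itertools.groupby post-pass (only the distinct keys are sorted).
import Mathlib
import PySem

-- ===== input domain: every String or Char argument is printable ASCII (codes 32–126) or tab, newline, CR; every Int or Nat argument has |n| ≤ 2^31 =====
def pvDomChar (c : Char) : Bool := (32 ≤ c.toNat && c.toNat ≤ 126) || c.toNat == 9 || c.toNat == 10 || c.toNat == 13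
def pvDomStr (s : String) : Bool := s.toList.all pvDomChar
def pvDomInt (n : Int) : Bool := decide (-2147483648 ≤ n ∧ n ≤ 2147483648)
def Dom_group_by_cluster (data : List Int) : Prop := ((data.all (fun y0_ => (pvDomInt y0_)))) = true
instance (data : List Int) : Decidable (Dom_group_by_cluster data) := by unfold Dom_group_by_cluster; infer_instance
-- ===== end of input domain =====

-- B replaces A's flat run-tuple list plus the sort-all-runs + itertools.groupby post-pass by
-- accumulating runs directly into a dict during the one scan and sorting only the distinct keys
-- (objective: simpler).

-- ===== PORT A =====
-- itertools.groupby(xs, key=lambda x: x[0]) with each group fully listed: consecutive elements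
-- with equal first component are one group.
def pyGroupbyFst (xs : List (Int × List Int)) : List (Int × List (Int × List Int)) :=
  match xs with
  | [] => []
  | x :: rest =>
      (x.1, x :: rest.takeWhile (fun y => y.1 == x.1)) ::
        pyGroupbyFst (rest.dropWhile (fun y => y.1 == x.1))
termination_by xs.length
decreasing_by simpa using Nat.lt_succ_of_le (List.length_dropWhile_le _ _)

def group_by_cluster (data : List Int) : List (Int × List (List Int)) :=
  -- for i in range(len(data))[1:]
  let st := (PySem.List.slice (PySem.List.pyRange 0 (PySem.List.len data) 1) (some 1) none).foldl
    (fun (st : List (Int × List Int) × Int × List Int) i =>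
      if PySem.List.pyGetD data i 0 = PySem.List.pyGetD data st.2.1 0 then
        (st.1, st.2.1, st.2.2 ++ [i])
      else
        (st.1 ++ [(PySem.List.pyGetD data st.2.1 0, st.2.2)], i, [i]))
    ([], 0, [0])
  let sequences := st.1 ++ [(PySem.List.pyGetD data st.2.1 0, st.2.2)]
  -- {embedding_id: [el[1] for el in emb_frames] for … in groupby(sorted(sequences, key=…), key=…)}
  ((pyGroupbyFst (PySem.List.sorted sequences (fun x => x.1) false)).foldl
    (fun d g => d.insert g.1 (g.2.map (fun el => el.2))) PySem.Dict.empty).items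

-- ===== PORT B =====
def group_by_cluster_alt (data : List Int) : List (Int × List (List Int)) :=
  -- cur_val = data[0]; for i in range(1, len(data)): … runs.setdefault(cur_val, []).append(cur_run)
  let st := (PySem.List.pyRange 1 (PySem.List.len data) 1).foldl
    (fun (st : PySem.Dict Int (List (List Int)) × Int × List Int) i =>
      if PySem.List.pyGetD data i 0 = st.2.1 then
        (st.1, st.2.1, st.2.2 ++ [i])
      else
        (st.1.modify st.2.1 [] (fun v => v ++ [st.2.2]), PySem.List.pyGetD data i 0, [i]))
    (PySem.Dict.empty, PySem.List.pyGetD data 0 0, [0])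
  let runs := st.1.modify st.2.1 [] (fun v => v ++ [st.2.2])
  -- {k: runs[k] for k in sorted(runs)}
  ((PySem.List.sorted runs.keys (fun k => k) false).foldl
    (fun d k => d.insert k (runs.getD k [])) PySem.Dict.empty).items

-- ===== PRECONDITION & SPEC =====
-- A (and B) read the first element unconditionally, raising IndexError on empty input.
def Pre_group_by_cluster (data : List Int) : Prop := data ≠ []
instance (data : List Int) : Decidable (Pre_group_by_cluster data) := by
  unfold Pre_group_by_cluster; infer_instance
def pvWitness_group_by_cluster : List Int := [1, 1, 0, 1]

def Spec_group_by_cluster (data : List Int) (out : List (Int × List (List Int))) : Prop := out = group_by_cluster_alt data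
instance (data : List Int) (out : List (Int × List (List Int))) : Decidable (Spec_group_by_cluster data out) := by unfold Spec_group_by_cluster; infer_instance

-- ===== CLAIM (what is proved, stated in full; the proofs are below) =====
def Claim_equal_group_by_cluster : Prop := ∀ (data : List Int), Dom_group_by_cluster data → Pre_group_by_cluster data → Spec_group_by_cluster data (group_by_cluster data)

-- ===== LEMMAS AND PROOFS =====

-- B's run dictionary, as a function of A's flat run list.
def pvCollect (s : List (Int × List Int)) : PySem.Dict Int (List (List Int)) :=
  s.foldl (fun d p => d.modify p.1 [] (fun v => v ++ [p.2])) PySem.Dict.empty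

-- insertion of a key into a strictly increasing key list (set semantics)
def pvInsK (v : Int) : List Int → List Int
  | [] => [v]
  | k :: ks => if v < k then v :: k :: ks else if v = k then k :: ks else k :: pvInsK v ks

theorem pvInsK_mem (v : Int) (L : List Int) (a : Int) :
    a ∈ pvInsK v L ↔ a = v ∨ a ∈ L := by
  induction L with
  | nil => simp [pvInsK]
  | cons k ks ih =>
      by_cases h1 : v < k
      · simp only [pvInsK, h1, if_true, List.mem_cons]
      · by_cases h2 : v = k
        · subst h2
          simp only [pvInsK, h1, if_false, if_true, List.mem_cons]
          tauto
        · simp only [pvInsK, h1, h2, if_false, List.mem_cons, ih]; tauto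

theorem pvInsK_pairwise (v : Int) (L : List Int) (h : L.Pairwise (· < ·)) :
    (pvInsK v L).Pairwise (· < ·) := by
  induction L with
  | nil => simp [pvInsK]
  | cons k ks ih =>
      rcases List.pairwise_cons.mp h with ⟨hk, hks⟩
      by_cases h1 : v < k
      · simp only [pvInsK, h1, if_true]
        refine List.pairwise_cons.mpr ⟨?_, h⟩
        intro a ha
        rcases List.mem_cons.mp ha with rfl | ha
        · exact h1
        · exact lt_trans h1 (hk a ha)
      · by_cases h2 : v = k
        · simpa [pvInsK, h1, h2] using h
        · simp only [pvInsK, h1, h2, if_false]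
          refine List.pairwise_cons.mpr ⟨?_, ih hks⟩
          intro a ha
          rcases (pvInsK_mem v ks a).mp ha with rfl | ha
          · omega
          · exact hk a ha

theorem pvInsK_perm (v : Int) (L : List Int) (h : v ∉ L) :
    (pvInsK v L).Perm (L ++ [v]) := by
  induction L with
  | nil => simp [pvInsK]
  | cons k ks ih =>
      simp only [List.mem_cons, not_or] at h
      by_cases h1 : v < k
      · simpa [pvInsK, h1] using (List.perm_append_singleton v (k :: ks)).symm
      · simp only [pvInsK, h1, if_false, h.1, if_false]
        exact (ih h.2).cons k

theorem pvInsK_eq_of_mem (v : Int) (L : List Int) (hp : L.Pairwise (· < ·)) (h : v ∈ L) :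
    pvInsK v L = L := by
  induction L with
  | nil => cases h
  | cons k ks ih =>
      rcases List.pairwise_cons.mp hp with ⟨hk, hks⟩
      rcases List.mem_cons.mp h with rfl | h
      · simp [pvInsK]
      · have h1 : ¬ v < k := by have := hk v h; omega
        have h2 : v ≠ k := by have := hk v h; omega
        simp [pvInsK, h1, h2, ih hks h]

-- sorted keys of the key set, updated by one more key
theorem pvSortK_append (l : List Int) (v : Int) :
    PySem.List.sorted (PySem.Set.ofList (l ++ [v])) (fun x => x) false
      = pvInsK v (PySem.List.sorted (PySem.Set.ofList l) (fun x => x) false) := by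
  have hof : PySem.Set.ofList (l ++ [v]) = PySem.Set.add (PySem.Set.ofList l) v := by
    rw [PySem.Set.ofList_eq_foldl, PySem.Set.ofList_eq_foldl, List.foldl_append]
    rfl
  by_cases hv : v ∈ PySem.Set.ofList l
  · have hc : PySem.Set.contains (PySem.Set.ofList l) v = true :=
      (PySem.Set.contains_iff (PySem.Set.ofList l) v).mpr hv
    rw [hof, PySem.Set.add, hc, if_pos rfl,
      pvInsK_eq_of_mem v _ (PySem.List.sorted_ofList_pairwise_lt l)
        ((PySem.List.mem_sorted _ _ _ v).mpr hv)]
  · have hc : PySem.Set.contains (PySem.Set.ofList l) v = false := by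
      cases h : PySem.Set.contains (PySem.Set.ofList l) v
      · rfl
      · exact absurd ((PySem.Set.contains_iff _ v).mp h) hv
    rw [hof, PySem.Set.add, hc]
    simp only [Bool.false_eq_true, if_false]
    refine PySem.List.sorted_eq_of_perm_of_pairwise_lt _ _ _ ?_ ?_
    · refine ((pvInsK_perm v _ ?_).trans ?_)
      · intro hmem
        exact hv ((PySem.List.mem_sorted _ _ _ v).mp hmem)
      · exact (PySem.List.sorted_perm _ _ _).append_right [v]
    · exact pvInsK_pairwise v _ (PySem.List.sorted_ofList_pairwise_lt l)

-- one unfolding step of PySem.List.insertBy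
theorem pvInsertBy_cons {α : Type} (before : α → α → Bool) (x y : α) (t : List α) :
    PySem.List.insertBy before x (y :: t)
      = if before x y then x :: y :: t else y :: PySem.List.insertBy before x t := rfl

-- insertBy walks past elements it is not 'before'
theorem pvInsertBy_append_right {α : Type} (before : α → α → Bool) (x : α) (as bs : List α)
    (h : ∀ a ∈ as, before x a = false) :
    PySem.List.insertBy before x (as ++ bs) = as ++ PySem.List.insertBy before x bs := by
  induction as with
  | nil => simp
  | cons a as ih =>
      simp only [List.cons_append, pvInsertBy_cons, h a List.mem_cons_self,
        Bool.false_eq_true, if_false]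
      rw [ih (fun a ha => h a (List.mem_cons_of_mem _ ha))]

theorem pvInsertBy_all_true {α : Type} (before : α → α → Bool) (x : α) (ys : List α)
    (h : ∀ y ∈ ys, before x y = true) :
    PySem.List.insertBy before x ys = x :: ys := by
  cases ys with
  | nil => rfl
  | cons y ys => simp [pvInsertBy_cons, h y List.mem_cons_self]

theorem pvFlatMap_ext (x : Int × List Int) (ks : List Int) (f : Int → List (Int × List Int))
    (h : x.1 ∉ ks) :
    ks.flatMap (fun k => f k ++ if x.1 = k then [x] else []) = ks.flatMap f := by
  induction ks with
  | nil => rfl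
  | cons k ks ih =>
      simp only [List.mem_cons, not_or] at h
      simp [List.flatMap_cons, h.1, ih h.2]

-- the key insertion step of Python's stable insertion sort, on the canonical grouped form
theorem pvInsertBy_flatMap (x : Int × List Int) (K : List Int)
    (f : Int → List (Int × List Int))
    (hp : K.Pairwise (· < ·))
    (hkey : ∀ k ∈ K, ∀ p ∈ f k, p.1 = k)
    (hne : ∀ k ∈ K, f k ≠ [])
    (hx : x.1 ∉ K → f x.1 = []) :
    PySem.List.insertBy (fun a b => decide (a.1 < b.1)) x (K.flatMap f)
      = (pvInsK x.1 K).flatMap (fun k => f k ++ if x.1 = k then [x] else []) := by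
  induction K generalizing f with
  | nil =>
      simp [pvInsK, PySem.List.insertBy, hx (by simp)]
  | cons k ks ih =>
      rcases List.pairwise_cons.mp hp with ⟨hk, hks⟩
      obtain ⟨q, qs, hfk⟩ : ∃ q qs, f k = q :: qs := by
        cases hfk : f k with
        | nil => exact absurd hfk (hne k List.mem_cons_self)
        | cons q qs => exact ⟨q, qs, rfl⟩
      have hq : q.1 = k := hkey k List.mem_cons_self q (by rw [hfk]; exact List.mem_cons_self)
      have hrest : ∀ p ∈ ks.flatMap f, k < p.1 := by
        intro p hpmem
        rcases List.mem_flatMap.mp hpmem with ⟨k', hk', hpk'⟩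
        rw [hkey k' (List.mem_cons_of_mem _ hk') p hpk']
        exact hk k' hk'
      rcases lt_trichotomy x.1 k with hlt | heq | hgt
      · -- x goes strictly before the whole k-block
        have hnotin : x.1 ∉ k :: ks := by
          intro hmem
          rcases List.mem_cons.mp hmem with rfl | hmem
          · omega
          · have := hk _ hmem; omega
        have hnotks : x.1 ∉ ks := fun hmem => hnotin (List.mem_cons_of_mem _ hmem)
        have hnek : ¬ x.1 = k := by omega
        simp only [pvInsK, hlt, if_true, List.flatMap_cons, hfk, List.cons_append,
          pvInsertBy_cons]
        rw [pvFlatMap_ext x ks f hnotks]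
        simp [hq, hlt, hx hnotin, hnek]
      · -- x joins the existing k-block, at its end
        have hnotks : x.1 ∉ ks := by
          intro hmem; have := hk _ hmem; omega
        have h1 : ∀ a ∈ f k, decide (x.1 < a.1) = false := by
          intro a ha
          rw [hkey k List.mem_cons_self a ha]
          simp [heq]
        have h2 : ∀ p ∈ ks.flatMap f, decide (x.1 < p.1) = true := by
          intro p hpmem
          have := hrest p hpmem
          simp only [decide_eq_true_eq]
          omega
        rw [List.flatMap_cons, pvInsertBy_append_right _ _ _ _ h1,
          pvInsertBy_all_true _ _ _ h2]
        have hik : pvInsK x.1 (k :: ks) = k :: ks := by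
          simp [pvInsK, heq]
        rw [hik, List.flatMap_cons, if_pos heq, pvFlatMap_ext x ks f hnotks]
        simp
      · -- x belongs after the k-block
        have h1 : ∀ a ∈ f k, decide (x.1 < a.1) = false := by
          intro a ha
          rw [hkey k List.mem_cons_self a ha]
          simp only [decide_eq_false_iff_not]
          omega
        have hik : pvInsK x.1 (k :: ks) = k :: pvInsK x.1 ks := by
          have h3 : ¬ x.1 < k := by omega
          have h4 : x.1 ≠ k := by omega
          simp [pvInsK, h3, h4]
        rw [List.flatMap_cons, pvInsertBy_append_right _ _ _ _ h1, hik, List.flatMap_cons,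
          ih f hks (fun k' hk' => hkey k' (List.mem_cons_of_mem _ hk'))
            (fun k' hk' => hne k' (List.mem_cons_of_mem _ hk'))
            (fun hnm => hx (by
              intro hmem
              rcases List.mem_cons.mp hmem with h5 | h5
              · omega
              · exact hnm h5)),
          if_neg (by omega)]
        simp

-- Python's stable sort by first component, in canonical grouped form
theorem pvSorted_canon (s : List (Int × List Int)) :
    PySem.List.sorted s (fun p => p.1) false
      = (PySem.List.sorted (PySem.Set.ofList (s.map (fun p => p.1))) (fun x => x) false).flatMap
          (fun k => s.filter (fun p => p.1 == k)) := by
  induction s using List.reverseRecOn with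
  | nil => rfl
  | append_singleton t x ih =>
      rw [PySem.List.sorted_eq_foldl_insertBy, List.foldl_append, List.foldl_cons, List.foldl_nil,
        ← PySem.List.sorted_eq_foldl_insertBy, ih]
      rw [pvInsertBy_flatMap x _ _ (PySem.List.sorted_ofList_pairwise_lt _)
        (fun k _ p hp => by simpa using (List.mem_filter.mp hp).2)
        (fun k hk => by
          have hmem : k ∈ t.map (fun p => p.1) :=
            (PySem.Set.mem_ofList _ _).mp ((PySem.List.mem_sorted _ _ _ k).mp hk)
          rcases List.mem_map.mp hmem with ⟨p, hps, hpk⟩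
          exact List.ne_nil_of_mem (List.mem_filter.mpr ⟨hps, by simp [hpk]⟩))
        (fun hnm => by
          rw [List.filter_eq_nil_iff]
          intro p hps hpk
          exact hnm (((PySem.List.mem_sorted _ _ _ x.1).mpr
            ((PySem.Set.mem_ofList _ _).mpr
              (List.mem_map.mpr ⟨p, hps, by simpa using hpk⟩)))))]
      rw [show (t ++ [x]).map (fun p => p.1) = t.map (fun p => p.1) ++ [x.1] by simp,
        pvSortK_append]
      refine List.flatMap_congr ?_
      intro k _
      simp [List.filter_append, List.filter_cons, beq_iff_eq]

theorem pvTakeWhileDrop {α : Type} (p : α → Bool) (as bs : List α)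
    (h1 : ∀ a ∈ as, p a = true) (h2 : ∀ b ∈ bs, p b = false) :
    (as ++ bs).takeWhile p = as ∧ (as ++ bs).dropWhile p = bs := by
  induction as with
  | nil =>
      cases bs with
      | nil => simp
      | cons b bs =>
          simp [h2 b List.mem_cons_self]
  | cons a as ih =>
      obtain ⟨ht, hd⟩ := ih (fun a ha => h1 a (List.mem_cons_of_mem _ ha)) 
      simp [h1 a List.mem_cons_self, ht, hd]

theorem pvGroupby_canon (K : List Int) (f : Int → List (Int × List Int))
    (hp : K.Pairwise (· < ·))
    (hkey : ∀ k ∈ K, ∀ p ∈ f k, p.1 = k)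
    (hne : ∀ k ∈ K, f k ≠ []) :
    pyGroupbyFst (K.flatMap f) = K.map (fun k => (k, f k)) := by
  induction K with
  | nil => simp [pyGroupbyFst]
  | cons k ks ih =>
      rcases List.pairwise_cons.mp hp with ⟨hk, hks⟩
      obtain ⟨q, qs, hfk⟩ : ∃ q qs, f k = q :: qs := by
        cases hfk : f k with
        | nil => exact absurd hfk (hne k List.mem_cons_self)
        | cons q qs => exact ⟨q, qs, rfl⟩
      have hq : q.1 = k := hkey k List.mem_cons_self q (by rw [hfk]; exact List.mem_cons_self)
      have hflat : (k :: ks).flatMap f = q :: (qs ++ ks.flatMap f) := by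
        simp [hfk]
      have hall : ∀ a ∈ qs, (a.1 == q.1) = true := by
        intro a ha
        have : a.1 = k := hkey k List.mem_cons_self a (by rw [hfk]; exact List.mem_cons_of_mem _ ha)
        simp [this, hq]
      have hrest : ∀ p ∈ ks.flatMap f, (p.1 == q.1) = false := by
        intro p hpmem
        rcases List.mem_flatMap.mp hpmem with ⟨k', hk', hpk'⟩
        have h1 : p.1 = k' := hkey k' (List.mem_cons_of_mem _ hk') p hpk'
        have h2 := hk k' hk'
        simp only [beq_eq_false_iff_ne, ne_eq, h1, hq]
        omega
      obtain ⟨ht, hd⟩ := pvTakeWhileDrop (fun y => y.1 == q.1) qs (ks.flatMap f) hall hrest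
      rw [hflat, pyGroupbyFst, ht, hd,
        ih hks (fun k' hk' => hkey k' (List.mem_cons_of_mem _ hk'))
          (fun k' hk' => hne k' (List.mem_cons_of_mem _ hk')), List.map_cons, hq, hfk]

-- a dict built by inserting distinct keys in order is just the list of its pairs
theorem pvDict_items {α V : Type} (l : List α) (key : α → Int) (val : α → V)
    (h : (l.map key).Nodup) :
    ((l.foldl (fun d a => d.insert (key a) (val a)) PySem.Dict.empty).items)
      = l.map (fun a => (key a, val a)) := by
  induction l using List.reverseRecOn with
  | nil => rfl
  | append_singleton l a ih =>
      rw [List.map_append] at h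
      have hnd := (List.nodup_append.mp h).1
      have hfresh : key a ∉ l.map key := by
        intro hmem
        exact (List.nodup_append.mp h).2.2 (key a) hmem (key a) (by simp) rfl
      have hkeys : (l.foldl (fun d a => d.insert (key a) (val a))
          (PySem.Dict.empty : PySem.Dict Int V)).keys = PySem.Set.ofList (l.map key) := by
        rw [PySem.Dict.keys_foldl_insert_key l key (fun _ a => val a) PySem.Dict.empty]
        rfl
      have hcont : (l.foldl (fun d a => d.insert (key a) (val a))
          (PySem.Dict.empty : PySem.Dict Int V)).contains (key a) = false := by
        cases hc : (l.foldl (fun d a => d.insert (key a) (val a))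
            (PySem.Dict.empty : PySem.Dict Int V)).contains (key a)
        · rfl
        · exfalso
          have := (PySem.Dict.contains_iff_mem_keys _ _).mp hc
          rw [hkeys] at this
          exact hfresh ((PySem.Set.mem_ofList _ _).mp this)
      rw [List.foldl_append, List.foldl_cons, List.foldl_nil,
        PySem.Dict.items_insert_of_not_contains _ _ hcont, ih hnd, List.map_append]
      simp

-- the two finalisation passes agree on any flat run list
theorem pvFinal_eq (s : List (Int × List Int)) :
    ((pyGroupbyFst (PySem.List.sorted s (fun x => x.1) false)).foldl
        (fun d g => d.insert g.1 (g.2.map (fun el => el.2))) PySem.Dict.empty).items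
      = ((PySem.List.sorted (pvCollect s).keys (fun k => k) false).foldl
          (fun d k => d.insert k ((pvCollect s).getD k [])) PySem.Dict.empty).items := by
  have hp : (PySem.List.sorted (PySem.Set.ofList (s.map (fun p => p.1))) (fun x => x)
      false).Pairwise (· < ·) := PySem.List.sorted_ofList_pairwise_lt _
  have hnd : (PySem.List.sorted (PySem.Set.ofList (s.map (fun p => p.1))) (fun x => x)
      false).Nodup := hp.imp (fun h => ne_of_lt h)
  -- A's groupby-of-sorted pass, in canonical form
  have hA : ((pyGroupbyFst (PySem.List.sorted s (fun x => x.1) false)).foldl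
        (fun d g => d.insert g.1 (g.2.map (fun el => el.2))) PySem.Dict.empty).items
      = (PySem.List.sorted (PySem.Set.ofList (s.map (fun p => p.1))) (fun x => x) false).map
          (fun k => (k, (s.filter (fun p => p.1 == k)).map (fun el => el.2))) := by
    rw [pvSorted_canon s,
      pvGroupby_canon _ _ hp
        (fun k _ p hp' => by simpa using (List.mem_filter.mp hp').2)
        (fun k hk => by
          have hmem : k ∈ s.map (fun p => p.1) :=
            (PySem.Set.mem_ofList _ _).mp ((PySem.List.mem_sorted _ _ _ k).mp hk)
          rcases List.mem_map.mp hmem with ⟨p, hps, hpk⟩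
          exact List.ne_nil_of_mem (List.mem_filter.mpr ⟨hps, by simp [hpk]⟩))]
    refine (pvDict_items
        ((PySem.List.sorted (PySem.Set.ofList (s.map (fun p => p.1))) (fun x => x) false).map
          (fun k => (k, s.filter (fun p => p.1 == k))))
        (fun (g : Int × List (Int × List Int)) => g.1) (fun g => g.2.map (fun el => el.2))
        (by simpa [List.map_map, Function.comp_def] using hnd)).trans ?_
    simp [List.map_map, Function.comp]
  -- B's dict of runs, in canonical form
  have hkeys : (pvCollect s).keys = PySem.Set.ofList (s.map (fun p => p.1)) :=
    (PySem.Dict.keys_foldl_modify_key s (fun p => p.1) []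
      (fun _ p v => v ++ [p.2]) PySem.Dict.empty).trans rfl
  have hgetD : ∀ k, (pvCollect s).getD k []
      = (s.filter (fun p => p.1 == k)).map (fun el => el.2) :=
    fun k => (PySem.Dict.getD_foldl_modify_append s PySem.Dict.empty k).trans (by simp)
  have hB : ((PySem.List.sorted (pvCollect s).keys (fun k => k) false).foldl
        (fun d k => d.insert k ((pvCollect s).getD k [])) PySem.Dict.empty).items
      = (PySem.List.sorted (PySem.Set.ofList (s.map (fun p => p.1))) (fun x => x) false).map
          (fun k => (k, (s.filter (fun p => p.1 == k)).map (fun el => el.2))) := by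
    rw [hkeys]
    refine (pvDict_items
        (PySem.List.sorted (PySem.Set.ofList (s.map (fun p => p.1))) (fun x => x) false)
        (fun (k : Int) => k) (fun k => (pvCollect s).getD k [])
        (by simpa [List.map_id'] using hnd)).trans ?_
    refine List.map_congr_left ?_
    intro k _
    rw [hgetD k]
  rw [hA, hB]

-- the two scan loops agree, relating B's dict state to A's flat list state
theorem pvLoop_rel (data : List Int) (L : List Int) (s : List (Int × List Int))
    (cur : Int) (run : List Int) :
    L.foldl
      (fun (st : PySem.Dict Int (List (List Int)) × Int × List Int) i =>
        if PySem.List.pyGetD data i 0 = st.2.1 then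
          (st.1, st.2.1, st.2.2 ++ [i])
        else
          (st.1.modify st.2.1 [] (fun v => v ++ [st.2.2]), PySem.List.pyGetD data i 0, [i]))
      (pvCollect s, PySem.List.pyGetD data cur 0, run)
    = (fun t => (pvCollect t.1, PySem.List.pyGetD data t.2.1 0, t.2.2))
        (L.foldl
          (fun (st : List (Int × List Int) × Int × List Int) i =>
            if PySem.List.pyGetD data i 0 = PySem.List.pyGetD data st.2.1 0 then
              (st.1, st.2.1, st.2.2 ++ [i])
            else
              (st.1 ++ [(PySem.List.pyGetD data st.2.1 0, st.2.2)], i, [i]))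
          (s, cur, run)) := by
  induction L generalizing s cur run with
  | nil => rfl
  | cons i L ih =>
      simp only [List.foldl_cons]
      by_cases h : PySem.List.pyGetD data i 0 = PySem.List.pyGetD data cur 0
      · simpa [h] using ih s cur (run ++ [i])
      · have : pvCollect (s ++ [(PySem.List.pyGetD data cur 0, run)])
            = (pvCollect s).modify (PySem.List.pyGetD data cur 0) [] (fun v => v ++ [run]) := by
          simp [pvCollect, List.foldl_append]
        simpa [h, ← this] using ih (s ++ [(PySem.List.pyGetD data cur 0, run)]) i [i]

theorem pvRange_tail (data : List Int) :
    PySem.List.slice (PySem.List.pyRange 0 (PySem.List.len data) 1) (some 1) none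
      = PySem.List.pyRange 1 (PySem.List.len data) 1 := by
  rw [PySem.List.slice_from _ (a := 1) (by norm_num)]
  cases data with
  | nil => rfl
  | cons x xs =>
      rw [PySem.List.pyRange_one_cons (by simp [PySem.List.len_eq])]
      rfl

-- ===== VERDICT (by name: the statement is the Claim_ definition above) =====
theorem group_by_cluster_spec : Claim_equal_group_by_cluster := by
  intro data _ hpre
  unfold Spec_group_by_cluster group_by_cluster group_by_cluster_alt
  rw [pvRange_tail]
  have h0 : (PySem.Dict.empty : PySem.Dict Int (List (List Int))) = pvCollect [] := rfl
  rw [h0, pvLoop_rel data _ [] 0 [0]]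
  generalize (PySem.List.pyRange 1 (PySem.List.len data) 1).foldl _ ([], (0:Int), [(0:Int)]) = t
  have : (pvCollect t.1).modify (PySem.List.pyGetD data t.2.1 0) [] (fun v => v ++ [t.2.2])
      = pvCollect (t.1 ++ [(PySem.List.pyGetD data t.2.1 0, t.2.2)]) := by
    simp [pvCollect, List.foldl_append]
  dsimp only
  rw [this]
  exact pvFinal_eq (t.1 ++ [(PySem.List.pyGetD data t.2.1 0, t.2.2)])
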